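-- pv_equiv track=rewrite | github.com/dgsim126/codingTest | lv1/0908/모의고사.py | mark2
-- ===== SOURCE A (Python) =====
-- def mark2(n):
--     arr2 = []
--     odd = [1,3,4]
--     index = 0
--     for i in range(n):
--         if i % 2 != 0:
--             arr2.append(2)
--         else:
--             arr2.append(odd[index])
--             index += 1
--             if index > 2:
--                 index = 0
--     return arr2
-- ===== SOURCE B (Python) =====
-- _PATTERN = [1, 2, 3, 2, 4, 2]
--
-- def mark2(n):
--     return [_PATTERN[i % 6] for i in range(n)]
-- ===== Notes on version B (the rewrite author's own statement) =====
-- stated objective: idiomatic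
-- what changed: Replaced the parity branch with a manually-reset counter state by a single cyclic lookup into the precomputed period-6 table [1,2,3,2,4,2].
import Mathlib
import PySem

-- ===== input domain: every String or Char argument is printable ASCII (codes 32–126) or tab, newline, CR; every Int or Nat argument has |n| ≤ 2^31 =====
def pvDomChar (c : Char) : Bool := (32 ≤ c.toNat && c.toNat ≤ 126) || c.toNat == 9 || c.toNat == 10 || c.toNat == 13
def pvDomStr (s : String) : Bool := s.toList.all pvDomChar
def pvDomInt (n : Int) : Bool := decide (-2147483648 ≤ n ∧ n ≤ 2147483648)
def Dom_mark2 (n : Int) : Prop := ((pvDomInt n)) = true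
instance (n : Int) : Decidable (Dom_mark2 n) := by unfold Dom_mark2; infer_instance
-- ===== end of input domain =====

-- B replaces A's parity branch and manually-reset counter by one cyclic lookup into the
-- precomputed period-6 table [1,2,3,2,4,2] (idiomatic; same cost).

-- ===== PORT A =====
-- loop body of A: parity branch, append, counter incremented and reset past 2
-- (odd[index] is ported as pyGetD with default 0; the index is always in {0,1,2})
def mark2Step (st : List Int × Int) (i : Int) : List Int × Int :=
  if PySem.Int.mod i 2 ≠ 0 then
    (st.1 ++ [2], st.2)
  else
    (st.1 ++ [PySem.List.pyGetD ([1,3,4] : List Int) st.2 0],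
     if st.2 + 1 > 2 then 0 else st.2 + 1)

def mark2 (n : Int) : List Int :=
  ((PySem.List.pyRange 0 n).foldl mark2Step ([], 0)).1

-- ===== PORT B =====
def mark2_alt (n : Int) : List Int :=
  (PySem.List.pyRange 0 n).map
    (fun i => PySem.List.pyGetD ([1,2,3,2,4,2] : List Int) (PySem.Int.mod i 6) 0)

-- ===== PRECONDITION & SPEC =====
def Spec_mark2 (n : Int) (out : List Int) : Prop := out = mark2_alt n
instance (n : Int) (out : List Int) : Decidable (Spec_mark2 n out) := by unfold Spec_mark2; infer_instance

-- ===== CLAIM (what is proved, stated in full; the proofs are below) =====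
def Claim_equal_mark2 : Prop := ∀ (n : Int), Dom_mark2 n → Spec_mark2 n (mark2 n)

-- ===== LEMMAS AND PROOFS =====

-- one step of A's loop at position m produces exactly the period-6 table entry,
-- and the counter stays ⌈(m+1)/2⌉ mod 3
lemma mark2_step_eq (L : List Int) (m : Nat) :
    mark2Step (L, (((m+1)/2 % 3 : Nat) : Int)) (m : Int)
      = (L ++ [PySem.List.pyGetD ([1,2,3,2,4,2] : List Int) ((m % 6 : Nat) : Int) 0],
         (((m+1+1)/2 % 3 : Nat) : Int)) := by
  have h6 : m % 6 = 0 ∨ m % 6 = 1 ∨ m % 6 = 2 ∨ m % 6 = 3 ∨ m % 6 = 4 ∨ m % 6 = 5 := by omega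
  rcases h6 with h | h | h | h | h | h <;>
    · have h2 : (m : Int) % 2 = ((m % 6 % 2 : Nat) : Int) := by omega
      have ha : (m+1)/2 % 3 = (m % 6 + 1)/2 % 3 := by omega
      have hb : (m+1+1)/2 % 3 = (m % 6 + 2)/2 % 3 := by omega
      rw [h] at h2 ha hb
      simp [mark2Step, h2, ha, hb, h,
            PySem.List.pyGetD, PySem.List.pyGet?, PySem.List.pyIdx?]

lemma mark2_inv (m : Nat) :
    (List.range m).foldl (fun st (k : Nat) => mark2Step st (k : Int)) ([], 0)
      = ((List.range m).map
           (fun k => PySem.List.pyGetD ([1,2,3,2,4,2] : List Int) ((k % 6 : Nat) : Int) 0),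
         (((m+1)/2 % 3 : Nat) : Int)) := by
  induction m with
  | zero => simp
  | succ m ih =>
      rw [List.range_succ, List.foldl_append, ih, List.map_append,
          List.foldl_cons, List.foldl_nil]
      exact mark2_step_eq _ m

lemma mark2_mod6 (k : Nat) :
    PySem.Int.mod (k : Int) 6 = ((k % 6 : Nat) : Int) := by
  rw [PySem.Int.mod_eq_emod_of_pos (by norm_num)]
  omega

-- ===== VERDICT (by name: the statement is the Claim_ definition above) =====
theorem mark2_spec : Claim_equal_mark2 := by
  intro n _
  unfold Spec_mark2 mark2 mark2_alt
  by_cases h : n ≤ 0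
  · rw [PySem.List.pyRange_one_eq_nil h]; rfl
  · have hn : n = ((n.toNat : Nat) : Int) := by omega
    rw [hn, PySem.List.pyRange_zero_natCast, List.foldl_map, List.map_map]
    rw [mark2_inv]
    simp only [Function.comp_def, mark2_mod6]
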